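-- pv_equiv track=rewrite | github.com/CommanderCRM/HackerRank_problems | Algorithms/equalize_the_array.py | equalizeArray
-- ===== SOURCE A (Python) =====
-- def equalizeArray(arr):
--     count = {}
--     for elem in arr:
--         if elem in count:
--             count[elem] += 1
--         else:
--             count[elem] = 1
--     max_occurrences = max(count.values())
--     return len(arr) - max_occurrences
-- ===== SOURCE B (Python) =====
-- def equalizeArray(arr):
--     s = sorted(arr)
--     best = 0
--     run = 0
--     prev = None
--     for x in s:
--         if prev is not None and x == prev:
--             run += 1
--         else:
--             run = 1
--         if run > best:
--             best = run
--         prev = x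
--     return len(arr) - best
-- ===== Notes on version B (the rewrite author's own statement) =====
-- stated objective: alternative
-- what changed: Replaces the hash-map frequency counter plus max over dict values by sorting a copy of the array and scanning it once, tracking the length of the current run of equal neighbours and the best run seen.
import Mathlib
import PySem

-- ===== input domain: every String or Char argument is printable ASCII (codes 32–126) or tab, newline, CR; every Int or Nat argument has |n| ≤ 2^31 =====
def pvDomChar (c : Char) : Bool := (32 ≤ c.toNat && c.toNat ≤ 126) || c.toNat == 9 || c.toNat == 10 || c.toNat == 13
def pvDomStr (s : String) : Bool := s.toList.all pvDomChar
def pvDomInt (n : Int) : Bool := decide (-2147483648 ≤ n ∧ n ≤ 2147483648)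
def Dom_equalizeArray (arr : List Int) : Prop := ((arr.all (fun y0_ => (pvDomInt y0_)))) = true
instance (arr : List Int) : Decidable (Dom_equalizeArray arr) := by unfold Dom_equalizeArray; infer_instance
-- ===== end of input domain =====

-- B sorts a copy of the array and finds the longest run of equal neighbours in one scan,
-- instead of A's hash-map frequency count + max over the dict values: an alternative
-- algorithm (sort + linear scan vs hashing); Pre_ excludes only the empty list, where A raises.


-- ===== PORT A =====
def equalizeArray (arr : List Int) : Int :=
  let count := arr.foldl (fun d elem =>
      if d.contains elem then d.insert elem (d.getD elem 0 + 1)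
      else d.insert elem 1) PySem.Dict.empty
  -- max(count.values()) raises ValueError on an empty dict; those inputs are outside Pre_
  let maxOccurrences := (PySem.List.max? count.values (fun v => v)).getD 0
  (arr.length : Int) - maxOccurrences

-- ===== PORT B =====
-- the for-loop of Source B over the sorted copy: state (best, run, prev)
def pvBLoop (s : List Int) (best run : Int) (prev : Option Int) : Int :=
  match s with
  | [] => best
  | x :: t =>
      let run' := if prev = some x then run + 1 else 1
      let best' := if run' > best then run' else best
      pvBLoop t best' run' (some x)

def equalizeArray_alt (arr : List Int) : Int :=
  let s := PySem.List.sorted arr (fun y => y) false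
  (arr.length : Int) - pvBLoop s 0 0 none

-- ===== PRECONDITION & SPEC =====
-- Pre_ excludes only the empty list, on which A raises ValueError (max of an empty sequence)
def Pre_equalizeArray (arr : List Int) : Prop := arr ≠ []
instance (arr : List Int) : Decidable (Pre_equalizeArray arr) := by unfold Pre_equalizeArray; infer_instance
def pvWitness_equalizeArray : List Int := ([3, 3, 2, 1, 3])

def Spec_equalizeArray (arr : List Int) (out : Int) : Prop := out = equalizeArray_alt arr
instance (arr : List Int) (out : Int) : Decidable (Spec_equalizeArray arr out) := by unfold Spec_equalizeArray; infer_instance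

-- ===== CLAIM (what is proved, stated in full; the proofs are below) =====
def Claim_equal_equalizeArray : Prop := ∀ (arr : List Int), Dom_equalizeArray arr → Pre_equalizeArray arr → Spec_equalizeArray arr (equalizeArray arr)

-- ===== LEMMAS AND PROOFS =====

-- A's counting loop is Counter(arr)
theorem pvFold_eq_counter (arr : List Int) :
    arr.foldl (fun d elem =>
      if d.contains elem then d.insert elem (d.getD elem 0 + 1)
      else d.insert elem 1) PySem.Dict.empty = PySem.Dict.counter arr := by
  rw [← PySem.Dict.foldl_insert_getD_add_one_eq_counter]
  congr 1
  funext d x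
  by_cases h : d.contains x = true
  · simp [h]
  · simp only [Bool.not_eq_true] at h
    rw [if_neg (by simp [h]), PySem.Dict.getD_of_not_contains d 0 h, zero_add]

-- A's dict values are the counts of the distinct elements in first-occurrence order
theorem pvValues_counter (arr : List Int) :
    (PySem.Dict.counter arr).values
      = (PySem.Set.ofList arr).map (fun k => (arr.count k : Int)) := by
  show (PySem.Dict.counter arr).items.map (·.2) = _
  rw [PySem.Dict.items_counter, List.map_map]
  rfl

-- loop invariant of Source B's scan over a sorted list: prev = some v with v below everything
-- still to come and run ≤ best; the result is the running max of best, the pending run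
-- extended by the remaining copies of v, and the multiplicities of the other values
theorem pvBLoop_inv (s : List Int) (hs : s.Pairwise (· ≤ ·)) :
    ∀ (v run best : Int), run ≤ best → (∀ y ∈ s, v ≤ y) →
    pvBLoop s best run (some v)
      = List.foldl max best ((run + (s.count v : Int)) ::
          ((PySem.Set.ofList s).discard v).map (fun k => (s.count k : Int))) := by
  induction s with
  | nil =>
    intro v run best hrb _
    simp [pvBLoop, PySem.Set.ofList, PySem.Set.discard]
    omega
  | cons x t ih =>
    intro v run best hrb hv
    have hxt : ∀ y ∈ t, x ≤ y := (List.pairwise_cons.mp hs).1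
    have ht : t.Pairwise (· ≤ ·) := (List.pairwise_cons.mp hs).2
    have hcnt : (0 : Int) ≤ (t.count x : Int) := Int.natCast_nonneg _
    by_cases hvx : v = x
    · subst hvx
      have e1 : pvBLoop (v :: t) best run (some v)
          = pvBLoop t (if run + 1 > best then run + 1 else best) (run + 1) (some v) := by
        simp [pvBLoop]
      have hrb' : run + 1 ≤ (if run + 1 > best then run + 1 else best) := by
        split_ifs <;> omega
      rw [e1, ih ht v (run + 1) _ hrb' hxt]
      have e2 : (PySem.Set.ofList (v :: t)).discard v = (PySem.Set.ofList t).discard v := by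
        rw [PySem.Set.ofList_cons]
        unfold PySem.Set.discard
        simp [List.filter_filter]
      have e3 : List.map (fun k => (((v :: t).count k : Nat) : Int))
            ((PySem.Set.ofList t).discard v)
          = List.map (fun k => ((t.count k : Nat) : Int)) ((PySem.Set.ofList t).discard v) := by
        apply List.map_congr_left
        intro k hk
        have hkv : ¬(k = v) := by
          unfold PySem.Set.discard at hk
          have := (List.mem_filter.mp hk).2
          simpa using this
        have hvk : ¬v = k := fun h => hkv (Eq.symm h)
        simp [hvk]
      rw [e2, e3, List.count_cons_self, List.foldl_cons, List.foldl_cons]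
      congr 1
      have hc : (0 : Int) ≤ (t.count v : Int) := Int.natCast_nonneg _
      push_cast
      split_ifs <;> omega
    · have hvltx : v < x := lt_of_le_of_ne (hv x (List.mem_cons_self)) hvx
      have hvnt : v ∉ t := by
        intro hmem
        exact absurd rfl (ne_of_lt (lt_of_lt_of_le hvltx (hxt v hmem)))
      have hvns : v ∉ x :: t := by
        intro hmem
        rcases List.mem_cons.mp hmem with h | h
        · exact hvx h
        · exact hvnt h
      have e1 : pvBLoop (x :: t) best run (some v)
          = pvBLoop t (if 1 > best then 1 else best) 1 (some x) := by
        simp [pvBLoop, hvx]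
      have hrb' : (1 : Int) ≤ (if 1 > best then 1 else best) := by
        split_ifs <;> omega
      rw [e1, ih ht x 1 _ hrb' hxt]
      have e2 : (PySem.Set.ofList (x :: t)).discard v
          = x :: (PySem.Set.ofList t).discard x := by
        rw [PySem.Set.ofList_cons]
        unfold PySem.Set.discard
        rw [List.filter_cons]
        have hxv : (!x == v) = true := by simp [Ne.symm hvx]
        rw [if_pos hxv]
        congr 1
        apply List.filter_eq_self.mpr
        intro a ha
        have hat : a ∈ t := (PySem.Set.mem_ofList _ _).mp (List.mem_of_mem_filter ha)
        have : a ≠ v := fun h => hvnt (h ▸ hat)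
        simp [this]
      have e3 : List.map (fun k => (((x :: t).count k : Nat) : Int))
            ((PySem.Set.ofList t).discard x)
          = List.map (fun k => ((t.count k : Nat) : Int)) ((PySem.Set.ofList t).discard x) := by
        apply List.map_congr_left
        intro k hk
        have hkx : ¬(k = x) := by
          unfold PySem.Set.discard at hk
          have := (List.mem_filter.mp hk).2
          simpa using this
        have hxk : ¬x = k := fun h => hkx (Eq.symm h)
        simp [hxk]
      have e4 : (x :: t).count v = 0 := List.count_eq_zero.mpr hvns
      rw [e2, e4, List.map_cons, e3, List.count_cons_self,
          List.foldl_cons, List.foldl_cons, List.foldl_cons]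
      congr 1
      push_cast
      split_ifs <;> omega

-- starting the scan on a sorted nonempty list gives the max multiplicity
theorem pvBLoop_sorted (s : List Int) (hs : s.Pairwise (· ≤ ·)) (hne : s ≠ []) :
    pvBLoop s 0 0 none
      = List.foldl max 0 ((PySem.Set.ofList s).map (fun k => (s.count k : Int))) := by
  match s, hne with
  | x :: t, _ =>
    have hxt : ∀ y ∈ t, x ≤ y := (List.pairwise_cons.mp hs).1
    have ht : t.Pairwise (· ≤ ·) := (List.pairwise_cons.mp hs).2
    have e1 : pvBLoop (x :: t) 0 0 none = pvBLoop t 1 1 (some x) := by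
      simp [pvBLoop]
    rw [e1, pvBLoop_inv t ht x 1 1 le_rfl hxt]
    have e3 : List.map (fun k => (((x :: t).count k : Nat) : Int))
          ((PySem.Set.ofList t).discard x)
        = List.map (fun k => ((t.count k : Nat) : Int)) ((PySem.Set.ofList t).discard x) := by
      apply List.map_congr_left
      intro k hk
      have hkx : ¬(k = x) := by
        unfold PySem.Set.discard at hk
        have := (List.mem_filter.mp hk).2
        simpa using this
      have hxk : ¬x = k := fun h => hkx (Eq.symm h)
      simp [hxk]
    rw [PySem.Set.ofList_cons, List.map_cons, e3, List.count_cons_self,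
        List.foldl_cons, List.foldl_cons]
    congr 1
    have hc : (0 : Int) ≤ (t.count x : Int) := Int.natCast_nonneg _
    push_cast
    omega

-- the running max of the multiplicities is invariant under permutation of the list
theorem pvMax_perm (l₁ l₂ : List Int) (h : l₁.Perm l₂) :
    List.foldl max 0 ((PySem.Set.ofList l₁).map (fun k => (l₁.count k : Int)))
      = List.foldl max 0 ((PySem.Set.ofList l₂).map (fun k => (l₂.count k : Int))) := by
  have hfun : (fun k => ((l₁.count k : Nat) : Int)) = (fun k => ((l₂.count k : Nat) : Int)) := by
    funext k
    rw [h.count_eq]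
  have hofl : (PySem.Set.ofList l₁).Perm (PySem.Set.ofList l₂) := by
    refine (List.perm_ext_iff_of_nodup (PySem.Set.nodup_ofList _) (PySem.Set.nodup_ofList _)).mpr ?_
    intro a
    rw [PySem.Set.mem_ofList, PySem.Set.mem_ofList, h.mem_iff]
  have hmap : (List.map (fun k => ((l₂.count k : Nat) : Int)) (PySem.Set.ofList l₁)).Perm
      (List.map (fun k => ((l₂.count k : Nat) : Int)) (PySem.Set.ofList l₂)) := hofl.map _
  rw [hfun]
  exact @List.Perm.foldl_eq _ _ _ _ _ ⟨fun a b c => max_right_comm a b c⟩ hmap 0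

-- ===== VERDICT (by name: the statement is the Claim_ definition above) =====
theorem equalizeArray_spec : Claim_equal_equalizeArray := by
  intro arr _ hpre
  unfold Spec_equalizeArray equalizeArray equalizeArray_alt
  rw [pvFold_eq_counter]
  show (arr.length : Int)
      - (PySem.List.max? ((PySem.Dict.counter arr).values) (fun v => v)).getD 0
      = (arr.length : Int) - pvBLoop (PySem.List.sorted arr (fun y => y) false) 0 0 none
  rw [pvValues_counter]
  have hsne : PySem.List.sorted arr (fun y => y) false ≠ [] := by
    rw [Ne, PySem.List.sorted_eq_nil_iff]; exact hpre
  have hsp : (PySem.List.sorted arr (fun y => y) false).Pairwise (· ≤ ·) := by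
    have := PySem.List.sorted_pairwise arr (fun y => y)
    simpa using this
  rw [pvBLoop_sorted _ hsp hsne,
      pvMax_perm _ arr (PySem.List.sorted_perm arr (fun y => y) false)]
  match arr, hpre with
  | x :: t, _ =>
    rw [PySem.Set.ofList_cons, List.map_cons, PySem.List.max?_id_cons, List.foldl_cons,
        Option.getD_some]
    have hc0 : (1 : Int) ≤ (((x :: t).count x : Int)) := by
      have : 1 ≤ (x :: t).count x := by rw [List.count_cons_self]; omega
      exact_mod_cast this
    have : max (0 : Int) (((x :: t).count x : Int)) = ((x :: t).count x : Int) := by omega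
    rw [this]
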